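-- pv_equiv track=rewrite | github.com/yoonseopkim/baekjoonPractice | 백준/Gold/1941. 소문난 칠공주/소문난 칠공주.py | bfs
-- ===== SOURCE A (Python) =====
-- from collections import deque
--
-- dx = [-1,1,0,0]
--
-- dy = [0,0,-1,1]
--
-- def bfs(comb):
--     visited = set()
--     queue = deque([comb[0]])
--     visited.add(comb[0])
--
--     while queue:
--         #  7을 달성했을경우 경우의 수를 리턴한다 ,
--         x,y = queue.popleft()
--         for i in range(4):
--             nx = dx[i] + x
--             ny = dy[i] + y
--             if (nx,ny) in comb and (nx,ny) not in visited:
--                 queue.append((nx,ny))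
--                 visited.add((nx,ny))
--     return len(visited) ==7
-- ===== SOURCE B (Python) =====
-- OFFS = ((-1, 0), (1, 0), (0, -1), (0, 1))
--
--
-- def bfs(comb):
--     cells = set(comb)
--     comp = {comb[0]}
--     for _ in range(len(cells)):
--         comp |= {(c[0] + ox, c[1] + oy) for c in comp for ox, oy in OFFS} & cells
--     return len(comp) == 7
-- ===== Notes on version B (the rewrite author's own statement) =====
-- stated objective: alternative
-- what changed: Replaces the deque-based BFS (pop a cell, scan its four neighbours, append to the queue) by a queue-free round-based saturation: one set of cells is repeatedly expanded with all grid-neighbours that lie in comb, for len(set(comb)) rounds, then its size is compared with 7.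
import Mathlib
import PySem

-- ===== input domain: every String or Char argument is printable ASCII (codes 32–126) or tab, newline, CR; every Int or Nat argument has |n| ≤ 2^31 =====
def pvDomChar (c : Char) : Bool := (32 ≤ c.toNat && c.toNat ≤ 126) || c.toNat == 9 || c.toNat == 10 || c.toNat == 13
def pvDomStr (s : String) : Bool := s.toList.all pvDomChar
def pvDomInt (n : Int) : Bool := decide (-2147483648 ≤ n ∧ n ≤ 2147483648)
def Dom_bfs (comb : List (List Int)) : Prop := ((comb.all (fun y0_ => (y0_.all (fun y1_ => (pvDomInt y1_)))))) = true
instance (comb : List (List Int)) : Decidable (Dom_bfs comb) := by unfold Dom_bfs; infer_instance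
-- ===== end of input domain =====

-- B replaces the queue-based BFS by a queue-free round-based saturation of the component set (alternative algorithm, same result).

-- ===== PORT A =====
def dxA : List Int := [-1, 1, 0, 0]
def dyA : List Int := [0, 0, -1, 1]

-- the body of A's 'for i in range(4)' loop: state = (queue, visited)
def stepA (comb : List (List Int)) (x y : Int)
    (s : List (List Int) × List (List Int)) (i : Int) :
    List (List Int) × List (List Int) :=
  let nx := (PySem.List.pyGet? dxA i).getD 0 + x
  let ny := (PySem.List.pyGet? dyA i).getD 0 + y
  if comb.contains [nx, ny] && !(PySem.Set.contains s.2 [nx, ny]) then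
    (s.1 ++ [[nx, ny]], PySem.Set.add s.2 [nx, ny])
  else s

def innerA (comb : List (List Int)) (x y : Int)
    (s : List (List Int) × List (List Int)) :
    List (List Int) × List (List Int) :=
  (PySem.List.pyRange 0 4 1).foldl (stepA comb x y) s

-- termination measure helpers for the while loop
def visCount (comb v : List (List Int)) : Nat :=
  (PySem.List.dedup comb).countP (fun z => PySem.Set.contains v z)

def measA (comb q v : List (List Int)) : Nat :=
  5 * ((PySem.List.dedup comb).length - visCount comb v) + q.length

-- the 'while queue:' loop, on fuel (a totality guard only: bfs hands it enough fuel, proved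
-- in bfsLoop_spec below); none = fuel out (never reached) or the ValueError of 'x,y = cell'
def bfsLoop (comb : List (List Int)) : Nat → List (List Int) → List (List Int) → Option (List (List Int))
  | 0, _, _ => none
  | _ + 1, [], v => some v
  | fuel + 1, [x, y] :: qs, v => bfsLoop comb fuel (innerA comb x y (qs, v)).1 (innerA comb x y (qs, v)).2
  | _ + 1, _ :: _, _ => none

def bfs (comb : List (List Int)) : Bool :=
  match PySem.List.pyGet? comb 0 with
  | none => false        -- comb[0]: IndexError (outside Pre_)
  | some c0 =>
    match bfsLoop comb (measA comb [c0] (PySem.Set.add PySem.Set.empty c0) + 1) [c0]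
        (PySem.Set.add PySem.Set.empty c0) with
    | none => false      -- 'x,y = cell' ValueError (outside Pre_)
    | some visited => PySem.Set.len visited == 7

-- ===== PORT B =====
def pyOffs : List (Int × Int) := [(-1, 0), (1, 0), (0, -1), (0, 1)]

-- (c[0]+ox, c[1]+oy) for the four offsets; [] when Python would raise IndexError (unreachable under Pre_)
def neighB (c : List Int) : List (List Int) :=
  match c with
  | x :: y :: _ => pyOffs.map (fun o => [x + o.1, y + o.2])
  | _ => []

-- one round: comp |= {neighbours of comp} & cells
def expandB (cells : List (List Int)) (comp : PySem.Set (List Int)) : PySem.Set (List Int) :=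
  PySem.Set.union comp (PySem.Set.inter (PySem.Set.ofList (comp.flatMap neighB)) cells)

def bfs_alt (comb : List (List Int)) : Bool :=
  match PySem.List.pyGet? comb 0 with
  | none => false        -- comb[0]: IndexError (outside Pre_)
  | some c0 =>
    let cells := PySem.Set.ofList comb
    let comp := (List.range cells.length).foldl (fun comp _ => expandB cells comp) [c0]
    PySem.Set.len comp == 7

-- ===== PRECONDITION & SPEC =====
-- Pre_ excludes exactly the inputs where Python A raises: an empty comb (IndexError on comb[0])
-- and a first cell that is not a pair (ValueError on 'x,y = comb[0]').
def Pre_bfs (comb : List (List Int)) : Prop := comb ≠ [] ∧ (comb.headD []).length = 2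
instance (comb : List (List Int)) : Decidable (Pre_bfs comb) := by unfold Pre_bfs; infer_instance

def pvWitness_bfs : List (List Int) := [[0,0],[0,1],[1,1],[1,0],[2,0],[2,1],[3,0]]

def Spec_bfs (comb : List (List Int)) (out : Bool) : Prop := out = bfs_alt comb
instance (comb : List (List Int)) (out : Bool) : Decidable (Spec_bfs comb out) := by unfold Spec_bfs; infer_instance

-- ===== CLAIM (what is proved, stated in full; the proofs are below) =====
def Claim_equal_bfs : Prop := ∀ (comb : List (List Int)), Dom_bfs comb → Pre_bfs comb → Spec_bfs comb (bfs comb)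

-- ===== LEMMAS AND PROOFS =====

theorem countP_or_eq {α : Type} [DecidableEq α] (l : List α) (p : α → Bool) (n : α)
    (hl : l.Nodup) (hn : n ∈ l) (hpn : p n = false) :
    l.countP (fun z => p z || z == n) = l.countP p + 1 := by
  induction l with
  | nil => cases hn
  | cons a tl ih =>
    rcases List.nodup_cons.mp hl with ⟨ha, htl⟩
    by_cases han : a = n
    · subst han
      have hcong : tl.countP (fun z => p z || z == a) = tl.countP p := by
        apply List.countP_congr
        intro z hz
        have : z ≠ a := fun h => ha (h ▸ hz)
        simp [this]
      simp [hcong, hpn]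
    · have hn' : n ∈ tl := by
        rcases List.mem_cons.mp hn with h | h
        · exact absurd h.symm han
        · exact h
      have := ih htl hn'
      have hane : (a == n) = false := by simp [han]
      simp [List.countP_cons, this, hane]
      omega

-- one stepA call either leaves the state alone or appends one new visited+queued cell
theorem stepA_cases (comb : List (List Int)) (x y : Int)
    (s : List (List Int) × List (List Int)) (i : Int) :
    (stepA comb x y s i = s ∧
      ([(PySem.List.pyGet? dxA i).getD 0 + x, (PySem.List.pyGet? dyA i).getD 0 + y] ∈ comb →
       [(PySem.List.pyGet? dxA i).getD 0 + x, (PySem.List.pyGet? dyA i).getD 0 + y] ∈ s.2)) ∨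
    ([(PySem.List.pyGet? dxA i).getD 0 + x, (PySem.List.pyGet? dyA i).getD 0 + y] ∈ comb ∧
     [(PySem.List.pyGet? dxA i).getD 0 + x, (PySem.List.pyGet? dyA i).getD 0 + y] ∉ s.2 ∧
     stepA comb x y s i = (s.1 ++ [[(PySem.List.pyGet? dxA i).getD 0 + x, (PySem.List.pyGet? dyA i).getD 0 + y]],
                           s.2 ++ [[(PySem.List.pyGet? dxA i).getD 0 + x, (PySem.List.pyGet? dyA i).getD 0 + y]])) := by
  by_cases h2 : [(PySem.List.pyGet? dxA i).getD 0 + x, (PySem.List.pyGet? dyA i).getD 0 + y] ∈ s.2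
  · left
    refine ⟨?_, fun _ => h2⟩
    simp [stepA, PySem.Set.contains_eq_listContains, h2]
  · by_cases h1 : [(PySem.List.pyGet? dxA i).getD 0 + x, (PySem.List.pyGet? dyA i).getD 0 + y] ∈ comb
    · right
      refine ⟨h1, h2, ?_⟩
      simp [stepA, PySem.Set.contains_eq_listContains, h1, h2]
    · left
      refine ⟨?_, fun h => absurd h h1⟩
      simp [stepA, h1]

theorem measA_stepA_le (comb : List (List Int)) (x y : Int)
    (s : List (List Int) × List (List Int)) (i : Int) :
    measA comb (stepA comb x y s i).1 (stepA comb x y s i).2 ≤ measA comb s.1 s.2 := by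
  rcases stepA_cases comb x y s i with ⟨h, _⟩ | ⟨hnc, hnv, h⟩
  · rw [h]
  · rw [h]
    set n := [(PySem.List.pyGet? dxA i).getD 0 + x, (PySem.List.pyGet? dyA i).getD 0 + y] with hn
    have hdn : n ∈ PySem.List.dedup comb := by
      rw [PySem.List.mem_dedup]; exact hnc
    have hnodup : (PySem.List.dedup comb).Nodup := PySem.List.nodup_dedup comb
    have hpn : PySem.Set.contains s.2 n = false := by
      rw [PySem.Set.contains_eq_listContains]
      simp [hnv]
    have hcnt : (PySem.List.dedup comb).countP (fun z => PySem.Set.contains (s.2 ++ [n]) z)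
        = (PySem.List.dedup comb).countP (fun z => PySem.Set.contains s.2 z) + 1 := by
      have h0 := countP_or_eq (PySem.List.dedup comb) (fun z => PySem.Set.contains s.2 z) n hnodup hdn hpn
      rw [← h0]
      apply List.countP_congr
      intro z _
      by_cases hz : z ∈ s.2 <;> by_cases hzn : z = n <;>
        simp [PySem.Set.contains_eq_listContains, hz, hzn]
    have hle : visCount comb (s.2 ++ [n]) ≤ (PySem.List.dedup comb).length := by
      unfold visCount; exact List.countP_le_length
    unfold measA visCount at *
    simp only [List.length_append, List.length_cons, List.length_nil]
    omega

theorem measA_innerA_le (comb : List (List Int)) (x y : Int)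
    (s : List (List Int) × List (List Int)) :
    measA comb (innerA comb x y s).1 (innerA comb x y s).2 ≤ measA comb s.1 s.2 := by
  unfold innerA
  have hr : PySem.List.pyRange 0 4 1 = [0, 1, 2, 3] := by decide
  rw [hr]
  simp only [List.foldl]
  calc measA comb (stepA comb x y (stepA comb x y (stepA comb x y (stepA comb x y s 0) 1) 2) 3).1
        (stepA comb x y (stepA comb x y (stepA comb x y (stepA comb x y s 0) 1) 2) 3).2
      ≤ _ := measA_stepA_le comb x y _ 3
    _ ≤ _ := measA_stepA_le comb x y _ 2
    _ ≤ _ := measA_stepA_le comb x y _ 1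
    _ ≤ _ := measA_stepA_le comb x y s 0


-- the grid-adjacency relation both programs traverse
def Adj (comb : List (List Int)) (a b : List Int) : Prop := b ∈ neighB a ∧ b ∈ comb

def Reach (comb : List (List Int)) (c0 z : List Int) : Prop :=
  Relation.ReflTransGen (Adj comb) c0 z

-- ---- A side ----

theorem nbrsA_eq_neighB (x y : Int) :
    ([0, 1, 2, 3] : List Int).map
      (fun i => [(PySem.List.pyGet? dxA i).getD 0 + x, (PySem.List.pyGet? dyA i).getD 0 + y])
      = neighB [x, y] := by
  simp [neighB, pyOffs, dxA, dyA, PySem.List.pyGet?, PySem.List.pyIdx?]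
  omega

-- full characterisation of the inner for-loop over an arbitrary index list
theorem foldl_stepA_spec (comb : List (List Int)) (x y : Int) :
    ∀ (is : List Int) (s : List (List Int) × List (List Int)),
    ∃ new : List (List Int),
      (is.foldl (stepA comb x y) s) = (s.1 ++ new, s.2 ++ new) ∧
      (∀ z ∈ new, z ∈ comb ∧ z.length = 2 ∧
        z ∈ is.map (fun i => [(PySem.List.pyGet? dxA i).getD 0 + x, (PySem.List.pyGet? dyA i).getD 0 + y])) ∧
      (∀ z, z ∈ s.2 ++ new ↔ z ∈ s.2 ∨
        (z ∈ is.map (fun i => [(PySem.List.pyGet? dxA i).getD 0 + x, (PySem.List.pyGet? dyA i).getD 0 + y]) ∧ z ∈ comb)) ∧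
      (s.2.Nodup → (s.2 ++ new).Nodup) := by
  intro is
  induction is with
  | nil =>
    intro s
    exact ⟨[], by simp, by simp, by simp, by simp⟩
  | cons i is ih =>
    intro s
    rcases stepA_cases comb x y s i with ⟨h, himp⟩ | ⟨hnc, hnv, h⟩
    · -- no append at index i
      rcases ih s with ⟨new, h1, h2, h3, h4⟩
      refine ⟨new, by simpa [h] using h1, ?_, ?_, h4⟩
      · intro z hz
        rcases h2 z hz with ⟨hc, hl, hm⟩
        exact ⟨hc, hl, by simp [hm]⟩
      · intro z
        rw [h3 z]
        constructor
        · rintro (hz | ⟨hm, hc⟩)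
          · exact Or.inl hz
          · exact Or.inr ⟨by simp [hm], hc⟩
        · rintro (hz | ⟨hm, hc⟩)
          · exact Or.inl hz
          · rcases List.mem_map.mp hm with ⟨j, hj, hje⟩
            rcases List.mem_cons.mp hj with hj | hj
            · -- z is the index-i neighbour: the guard failed, so z ∈ comb → z ∈ s.2
              subst hj
              exact Or.inl (hje ▸ himp (hje.symm ▸ hc))
            · exact Or.inr ⟨List.mem_map.mpr ⟨j, hj, hje⟩, hc⟩
    · -- appended the index-i neighbour n
      set n := [(PySem.List.pyGet? dxA i).getD 0 + x, (PySem.List.pyGet? dyA i).getD 0 + y] with hndef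
      rcases ih (s.1 ++ [n], s.2 ++ [n]) with ⟨new, h1, h2, h3, h4⟩
      simp only at h1 h3 h4
      refine ⟨n :: new, ?_, ?_, ?_, ?_⟩
      · rw [List.foldl_cons, h, h1]
        simp
      · intro z hz
        rcases List.mem_cons.mp hz with hz | hz
        · subst hz
          exact ⟨hnc, by simp [hndef], by simp [hndef]⟩
        · rcases h2 z hz with ⟨hc, hl, hm⟩
          exact ⟨hc, hl, by simp [hm]⟩
      · intro z
        have hz3 := h3 z
        constructor
        · intro hz
          have hz' : z ∈ (s.2 ++ [n]) ++ new := by simpa using hz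
          rcases hz3.mp hz' with hz2 | ⟨hm, hc⟩
          · rcases List.mem_append.mp hz2 with hz3' | hz3'
            · exact Or.inl hz3'
            · have : z = n := by simpa using hz3'
              subst this
              exact Or.inr ⟨by simp [hndef], hnc⟩
          · exact Or.inr ⟨by simp [hm], hc⟩
        · rintro (hz | ⟨hm, hc⟩)
          · have : z ∈ (s.2 ++ [n]) ++ new := by simp [hz]
            simpa using this
          · rcases List.mem_map.mp hm with ⟨j, hj, hje⟩
            rcases List.mem_cons.mp hj with hj | hj
            · subst hj
              have hzn : z = n := hje.symm
              have : z ∈ (s.2 ++ [n]) ++ new := by simp [hzn]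
              simpa using this
            · have : z ∈ (s.2 ++ [n]) ++ new :=
                hz3.mpr (Or.inr ⟨List.mem_map.mpr ⟨j, hj, hje⟩, hc⟩)
              simpa using this
      · intro hnd
        have : ((s.2 ++ [n]) ++ new).Nodup := h4 (by
          rw [List.nodup_append]
          refine ⟨hnd, by simp, ?_⟩
          simp
          exact fun a ha h => hnv (h ▸ ha))
        simpa using this

-- the BFS invariant
def InvA (comb : List (List Int)) (c0 : List Int) (q v : List (List Int)) : Prop :=
  v.Nodup ∧ c0 ∈ v ∧ (∀ z ∈ q, z ∈ v) ∧ (∀ z ∈ v, Reach comb c0 z) ∧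
  (∀ z ∈ v, z.length = 2) ∧
  (∀ a ∈ v, a ∈ q ∨ ∀ b, Adj comb a b → b ∈ v)

theorem bfsLoop_spec (comb : List (List Int)) (c0 : List Int) :
    ∀ fuel q v, measA comb q v < fuel → InvA comb c0 q v →
    ∃ r, bfsLoop comb fuel q v = some r ∧ r.Nodup ∧ (∀ z, z ∈ r ↔ Reach comb c0 z) := by
  intro fuel
  induction fuel with
  | zero =>
    intro q v hm _
    exact absurd hm (by omega)
  | succ N ih =>
    intro q v hm hinv
    cases q with
    | nil =>
      refine ⟨v, by rw [bfsLoop], hinv.1, ?_⟩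
      intro z
      constructor
      · exact fun hz => hinv.2.2.2.1 z hz
      · intro hz
        induction hz with
        | refl => exact hinv.2.1
        | tail _ hadj ih2 =>
          rename_i a b _
          rcases hinv.2.2.2.2.2 a ih2 with h | h
          · cases h
          · exact h b hadj
    | cons c qs =>
      have hcv : c ∈ v := hinv.2.2.1 c (by simp)
      have hclen : c.length = 2 := hinv.2.2.2.2.1 c hcv
      obtain ⟨x, y, hc⟩ : ∃ x y, c = [x, y] := by
        cases c with
        | nil => simp at hclen
        | cons a t =>
          cases t with
          | nil => simp at hclen
          | cons b t2 =>
            cases t2 with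
            | nil => exact ⟨a, b, rfl⟩
            | cons _ _ => simp at hclen
      subst hc
      rw [bfsLoop]
      -- analyse the inner fold
      have hr : PySem.List.pyRange 0 4 1 = [0, 1, 2, 3] := by decide
      rcases foldl_stepA_spec comb x y [0, 1, 2, 3] (qs, v) with ⟨new, h1, h2, h3, h4⟩
      have hinner : innerA comb x y (qs, v) = (qs ++ new, v ++ new) := by
        unfold innerA; rw [hr]; exact h1
      have hneq : ([0, 1, 2, 3] : List Int).map
          (fun i => [(PySem.List.pyGet? dxA i).getD 0 + x, (PySem.List.pyGet? dyA i).getD 0 + y])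
          = neighB [x, y] := nbrsA_eq_neighB x y
      -- re-establish the invariant
      have hinv' : InvA comb c0 (qs ++ new) (v ++ new) := by
        refine ⟨h4 hinv.1, by simp [hinv.2.1], ?_, ?_, ?_, ?_⟩
        · intro z hz
          rcases List.mem_append.mp hz with hz | hz
          · simp [hinv.2.2.1 z (by simp [hz])]
          · simp [hz]
        · intro z hz
          rcases List.mem_append.mp hz with hz | hz
          · exact hinv.2.2.2.1 z hz
          · rcases h2 z hz with ⟨hc, _, hm⟩
            rw [hneq] at hm
            exact Relation.ReflTransGen.tail (hinv.2.2.2.1 _ hcv) ⟨hm, hc⟩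
        · intro z hz
          rcases List.mem_append.mp hz with hz | hz
          · exact hinv.2.2.2.2.1 z hz
          · exact (h2 z hz).2.1
        · intro a ha
          rcases List.mem_append.mp ha with ha | ha
          · by_cases hac : a = [x, y]
            · subst hac
              right
              intro b hb
              have : b ∈ v ++ new := (h3 b).mpr (Or.inr ⟨by rw [hneq]; exact hb.1, hb.2⟩)
              exact this
            · rcases hinv.2.2.2.2.2 a ha with h | h
              · rcases List.mem_cons.mp h with h | h
                · exact absurd h hac
                · left; exact List.mem_append.mpr (Or.inl h)
              · right
                intro b hb
                exact List.mem_append.mpr (Or.inl (h b hb))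
          · left; exact List.mem_append.mpr (Or.inr ha)
      -- measure decreases
      have hmle := measA_innerA_le comb x y (qs, v)
      rw [hinner] at hmle
      have hlt : measA comb qs v < measA comb ([x, y] :: qs) v := by
        unfold measA; simp only [List.length_cons]; omega
      have : measA comb (qs ++ new) (v ++ new) < N := by
        simp only at hmle
        omega
      have hres := ih (qs ++ new) (v ++ new) this hinv'
      simpa [hinner] using hres

-- ---- B side ----

theorem union_prefix (t : List (List Int)) :
    ∀ s : List (List Int), ∃ ex, PySem.Set.union s t = s ++ ex := by
  have key : ∀ (t s : List (List Int)), ∃ ex, t.foldl PySem.Set.add s = s ++ ex := by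
    intro t
    induction t with
    | nil => intro s; exact ⟨[], by simp⟩
    | cons a t ih =>
      intro s
      by_cases h : a ∈ s
      · rcases ih s with ⟨ex, hex⟩
        refine ⟨ex, ?_⟩
        rw [List.foldl_cons, PySem.Set.add_of_mem h]
        exact hex
      · rcases ih (s ++ [a]) with ⟨ex, hex⟩
        refine ⟨[a] ++ ex, ?_⟩
        rw [List.foldl_cons, PySem.Set.add_of_not_mem h, hex]
        simp
  intro s
  exact key t s

theorem mem_expandB (comb : List (List Int)) (comp : PySem.Set (List Int)) (z : List Int) :
    z ∈ expandB (PySem.Set.ofList comb) comp ↔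
      z ∈ comp ∨ (∃ a ∈ comp, z ∈ neighB a ∧ z ∈ comb) := by
  unfold expandB
  rw [PySem.Set.mem_union _ _ z, PySem.Set.mem_inter _ _ z]
  constructor
  · rintro (h | ⟨h1, h2⟩)
    · exact Or.inl h
    · rw [PySem.Set.mem_ofList _ _, List.mem_flatMap] at h1
      rcases h1 with ⟨a, ha, hz⟩
      exact Or.inr ⟨a, ha, hz, (PySem.Set.mem_ofList _ _).mp h2⟩
  · rintro (h | ⟨a, ha, h1, h2⟩)
    · exact Or.inl h
    · exact Or.inr ⟨(PySem.Set.mem_ofList _ _).mpr (List.mem_flatMap.mpr ⟨a, ha, h1⟩),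
        (PySem.Set.mem_ofList _ _).mpr h2⟩

theorem nodup_expandB (cells : List (List Int)) (comp : PySem.Set (List Int))
    (h : comp.Nodup) : (expandB cells comp).Nodup :=
  PySem.Set.nodup_union _ _ h

-- iterate of a fold over range
theorem foldl_range_eq_iterate {α : Type} (F : α → α) (n : ℕ) (a : α) :
    (List.range n).foldl (fun s _ => F s) a = F^[n] a := by
  induction n with
  | zero => simp
  | succ n ih => rw [List.range_succ, List.foldl_append, ih, Function.iterate_succ_apply']; simp

theorem expandB_growth (comb : List (List Int)) (c0 : List Int) :
    ∀ k : ℕ,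
      (expandB (PySem.Set.ofList comb))^[k + 1] [c0] = (expandB (PySem.Set.ofList comb))^[k] [c0] ∨
      ((expandB (PySem.Set.ofList comb))^[k] [c0]).length ≥ k + 1 := by
  intro k
  induction k with
  | zero => right; simp
  | succ k ih =>
    rcases ih with h | h
    · left
      rw [Function.iterate_succ_apply', Function.iterate_succ_apply']
      rw [Function.iterate_succ_apply'] at h
      exact congrArg _ h
    · set ck := (expandB (PySem.Set.ofList comb))^[k] [c0] with hck
      rcases union_prefix (PySem.Set.inter (PySem.Set.ofList (ck.flatMap neighB)) (PySem.Set.ofList comb)) ck with ⟨ex, hex⟩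
      have hstep : (expandB (PySem.Set.ofList comb))^[k+1] [c0] = ck ++ ex := by
        rw [Function.iterate_succ_apply', ← hck]
        exact hex
      cases ex with
      | nil =>
        left
        have hfix : expandB (PySem.Set.ofList comb) ck = ck := by
          unfold expandB; simpa using hex
        rw [Function.iterate_succ_apply' (n := k + 1), hstep]
        simpa [hfix] using hfix
      | cons e ex' =>
        right
        rw [hstep]
        simp
        omega

-- the component after |cells| rounds is exactly the reachable set
theorem iterB_spec (comb : List (List Int)) (c0 : List Int) (hc0 : c0 ∈ comb) :
    let F := expandB (PySem.Set.ofList comb)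
    let n := (PySem.Set.ofList comb).length
    (F^[n] [c0]).Nodup ∧ (∀ z, z ∈ F^[n] [c0] ↔ Reach comb c0 z) := by
  intro F n
  -- basic facts by induction on k
  have hbase : ∀ k : ℕ, (F^[k] [c0]).Nodup ∧ c0 ∈ F^[k] [c0] ∧
      (∀ z ∈ F^[k] [c0], Reach comb c0 z ∧ z ∈ comb) := by
    intro k
    induction k with
    | zero => exact ⟨by simp, by simp, by intro z hz; simp at hz; subst hz; exact ⟨Relation.ReflTransGen.refl, hc0⟩⟩
    | succ k ih =>
      rw [Function.iterate_succ_apply']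
      refine ⟨nodup_expandB _ _ ih.1, ?_, ?_⟩
      · rcases union_prefix (PySem.Set.inter (PySem.Set.ofList ((F^[k] [c0]).flatMap neighB)) (PySem.Set.ofList comb)) (F^[k] [c0]) with ⟨ex, hex⟩
        show c0 ∈ expandB (PySem.Set.ofList comb) (F^[k] [c0])
        unfold expandB
        rw [hex]
        simp [ih.2.1]
      · intro z hz
        rcases (mem_expandB comb _ z).mp hz with h | ⟨a, ha, h1, h2⟩
        · exact ih.2.2 z h
        · exact ⟨Relation.ReflTransGen.tail (ih.2.2 a ha).1 ⟨h1, h2⟩, h2⟩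
  -- cardinality bound: F^[k] [c0] ⊆ ofList comb, nodup, so length ≤ n
  have hbound : ∀ k : ℕ, (F^[k] [c0]).length ≤ n := by
    intro k
    have hsub : F^[k] [c0] ⊆ PySem.Set.ofList comb := by
      intro z hz
      exact (PySem.Set.mem_ofList _ _).mpr ((hbase k).2.2 z hz).2
    exact ((hbase k).1.subperm hsub).length_le
  -- fixpoint at n
  have hfix : F^[n + 1] [c0] = F^[n] [c0] := by
    have hFe : expandB (PySem.Set.ofList comb) = F := rfl
    rcases expandB_growth comb c0 n with h | h
    · rw [hFe] at h; exact h
    · rw [hFe] at h; exact absurd (hbound n) (by omega)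
  have hclosed : ∀ a ∈ F^[n] [c0], ∀ b, Adj comb a b → b ∈ F^[n] [c0] := by
    intro a ha b hb
    have : b ∈ F^[n + 1] [c0] := by
      rw [Function.iterate_succ_apply']
      exact (mem_expandB comb _ b).mpr (Or.inr ⟨a, ha, hb.1, hb.2⟩)
    rwa [hfix] at this
  refine ⟨(hbase n).1, ?_⟩
  intro z
  constructor
  · exact fun hz => ((hbase n).2.2 z hz).1
  · intro hz
    induction hz with
    | refl => exact (hbase n).2.1
    | tail _ hadj ih =>
      rename_i a b _
      exact hclosed a ih b hadj

-- ===== VERDICT (by name: the statement is the Claim_ definition above) =====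
theorem bfs_spec : Claim_equal_bfs := by
  intro comb _ hpre
  unfold Spec_bfs
  rcases hpre with ⟨hne, hlen⟩
  obtain ⟨c0, rest, hcomb⟩ : ∃ c0 rest, comb = c0 :: rest := by
    cases comb with
    | nil => exact absurd rfl hne
    | cons a l => exact ⟨a, l, rfl⟩
  subst hcomb
  have hc0len : c0.length = 2 := by simpa using hlen
  have hc0mem : c0 ∈ c0 :: rest := by simp
  -- A's side
  have hget : PySem.List.pyGet? (c0 :: rest) 0 = some c0 := by
    simp
  have hinit : PySem.Set.add PySem.Set.empty c0 = [c0] := by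
    simp [PySem.Set.empty]
  have hinv : InvA (c0 :: rest) c0 [c0] [c0] := by
    refine ⟨by simp, by simp, by simp, ?_, ?_, ?_⟩
    · intro z hz; simp at hz; subst hz; exact Relation.ReflTransGen.refl
    · intro z hz; simp at hz; subst hz; exact hc0len
    · intro a ha; left; exact ha
  rcases bfsLoop_spec (c0 :: rest) c0 (measA (c0 :: rest) [c0] [c0] + 1) [c0] [c0]
      (by omega) hinv with ⟨r, hrun, hrnd, hrmem⟩
  -- B's side
  rcases iterB_spec (c0 :: rest) c0 hc0mem with ⟨hcnd, hcmem⟩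
  -- same members, both nodup ⇒ same length
  have hperm : r.Perm ((expandB (PySem.Set.ofList (c0 :: rest)))^[(PySem.Set.ofList (c0 :: rest)).length] [c0]) := by
    rw [List.perm_ext_iff_of_nodup hrnd hcnd]
    intro z
    rw [hrmem z, hcmem z]
  have hlen' : r.length = ((expandB (PySem.Set.ofList (c0 :: rest)))^[(PySem.Set.ofList (c0 :: rest)).length] [c0]).length := hperm.length_eq
  show bfs (c0 :: rest) = bfs_alt (c0 :: rest)
  unfold bfs bfs_alt
  rw [hget]
  simp only [hinit, hrun]
  rw [foldl_range_eq_iterate (expandB (PySem.Set.ofList (c0 :: rest)))]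
  unfold PySem.Set.len
  rw [hlen']
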